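-- pv_equiv track=rewrite | github.com/jack-chaudier/mirage | projects/rhun/experiments/by_topic/diagnostics/run_tp_misselection_analysis.py | _cooccurrence_matrix
-- ===== SOURCE A (Python) =====
-- def _cooccurrence_matrix(violation_sets: list[set[str]]) -> dict[str, dict[str, int]]:
--     unique = sorted({violation for row in violation_sets for violation in row})
--     matrix: dict[str, dict[str, int]] = {}
--     for a in unique:
--         matrix[a] = {}
--         for b in unique:
--             matrix[a][b] = sum(1 for row in violation_sets if a in row and b in row)
--     return matrix
-- ===== SOURCE B (Python) =====
-- def _cooccurrence_matrix(violation_sets: list[set[str]]) -> dict[str, dict[str, int]]: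
--     unique = sorted({violation for row in violation_sets for violation in row})
--     matrix: dict[str, dict[str, int]] = {a: {b: 0 for b in unique} for a in unique}
--     for row in violation_sets:
--         labels = list(dict.fromkeys(row))
--         for a in labels:
--             inner = matrix[a]
--             for b in labels:
--                 inner[b] += 1
--     return matrix
-- ===== Notes on version B (the rewrite author's own statement) =====
-- stated objective: faster
-- what changed: Instead of scanning all rows for every (a,b) pair of unique labels (O(U^2*N)), B initialises the U x U matrix to zero and makes one pass over the rows, incrementing only the co-present label pairs of each row.
import Mathlib
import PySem

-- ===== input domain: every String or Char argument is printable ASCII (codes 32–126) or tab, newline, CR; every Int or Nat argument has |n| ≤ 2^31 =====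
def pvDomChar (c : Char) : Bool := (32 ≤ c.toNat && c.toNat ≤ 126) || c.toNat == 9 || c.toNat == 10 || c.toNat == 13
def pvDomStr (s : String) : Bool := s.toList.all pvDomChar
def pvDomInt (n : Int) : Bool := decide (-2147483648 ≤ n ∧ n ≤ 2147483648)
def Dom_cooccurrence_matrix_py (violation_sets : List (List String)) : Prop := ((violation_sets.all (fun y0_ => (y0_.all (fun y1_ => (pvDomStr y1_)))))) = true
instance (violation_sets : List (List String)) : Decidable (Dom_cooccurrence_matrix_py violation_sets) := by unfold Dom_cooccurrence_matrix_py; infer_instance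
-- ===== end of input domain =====

-- B replaces A's per-(a,b)-pair scan of all rows by one pass over the rows that
-- increments only co-present label pairs (objective: faster).

-- shared helper: 'unique = sorted({violation for row in violation_sets for violation in row})',
-- the identical first line of both Source A and Source B
def pvUnique (violation_sets : List (List String)) : List String :=
  PySem.List.sorted (PySem.Set.ofList (violation_sets.flatMap (fun row => row))) (fun v => v) false

-- ===== PORT A =====
def cooccurrence_matrix_py (violation_sets : List (List String)) : List (String × List (String × Int)) :=
  (((pvUnique violation_sets).foldl (fun matrix a =>
      matrix.insert a
        ((pvUnique violation_sets).foldl (fun inner b =>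
            inner.insert b
              (violation_sets.foldl
                (fun acc row => if row.contains a && row.contains b then acc + 1 else acc) (0 : Int)))
          PySem.Dict.empty))
    (PySem.Dict.empty : PySem.Dict String (PySem.Dict String Int))).items).map
    (fun p => (p.1, p.2.items))

-- ===== PORT B =====
-- matrix[a][b] += 1 with both keys always present: Dict.modify, its default never used.
def cooccurrence_matrix_py_alt (violation_sets : List (List String)) : List (String × List (String × Int)) :=
  ((violation_sets.foldl (fun matrix row =>
      (PySem.List.dedup row).foldl (fun m a =>
          m.modify a PySem.Dict.empty (fun inner =>
            (PySem.List.dedup row).foldl (fun inn b => inn.modify b 0 (· + 1)) inner)) matrix)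
    (PySem.Dict.mk ((pvUnique violation_sets).map (fun a =>
      (a, PySem.Dict.mk ((pvUnique violation_sets).map (fun b => (b, (0 : Int))))))))).items).map
    (fun p => (p.1, p.2.items))

-- ===== PRECONDITION & SPEC =====
def Spec_cooccurrence_matrix_py (violation_sets : List (List String)) (out : List (String × List (String × Int))) : Prop := out = cooccurrence_matrix_py_alt violation_sets
instance (violation_sets : List (List String)) (out : List (String × List (String × Int))) : Decidable (Spec_cooccurrence_matrix_py violation_sets out) := by unfold Spec_cooccurrence_matrix_py; infer_instance

-- ===== CLAIM (what is proved, stated in full; the proofs are below) =====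
def Claim_equal_cooccurrence_matrix_py : Prop := ∀ (violation_sets : List (List String)), Dom_cooccurrence_matrix_py violation_sets → Spec_cooccurrence_matrix_py violation_sets (cooccurrence_matrix_py violation_sets)

-- ===== LEMMAS AND PROOFS =====

-- canonical form: a map-shaped dict of dicts
def pvMkM (us : List String) (g : String → String → Int) : PySem.Dict String (PySem.Dict String Int) :=
  PySem.Dict.mk (us.map (fun a => (a, PySem.Dict.mk (us.map (fun b => (b, g a b))))))

theorem pvUnique_nodup (vs : List (List String)) : (pvUnique vs).Nodup :=
  ((PySem.List.sorted_perm _ _ _).nodup_iff).mpr (PySem.Set.nodup_ofList _)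

theorem pvUnique_sub (vs : List (List String)) :
    ∀ row ∈ vs, ∀ x ∈ row, x ∈ pvUnique vs := by
  intro row hrow x hx
  unfold pvUnique
  rw [PySem.List.mem_sorted, PySem.Set.mem_ofList, List.mem_flatMap]
  exact ⟨row, hrow, hx⟩

-- Dict.modify on a map-shaped dict with nodup keys and a present key updates pointwise.
theorem pv_modify_mk_map {ν : Type} (us : List String) (hnd : us.Nodup) (g : String → ν)
    (k : String) (hk : k ∈ us) (d0 : ν) (f : ν → ν) :
    (PySem.Dict.mk (us.map (fun b => (b, g b)))).modify k d0 f
      = PySem.Dict.mk (us.map (fun b => (b, if b = k then f (g b) else g b))) := by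
  have hkeys : (PySem.Dict.mk (us.map (fun b => (b, g b)))).keys = us := by
    simp [PySem.Dict.keys, Function.comp_def]
  have hknd : (PySem.Dict.mk (us.map (fun b => (b, g b)))).keys.Nodup := by
    rw [hkeys]; exact hnd
  have hitems : (k, g k) ∈ (PySem.Dict.mk (us.map (fun b => (b, g b)))).items :=
    List.mem_map_of_mem hk
  have hget : (PySem.Dict.mk (us.map (fun b => (b, g b)))).getD k d0 = g k :=
    PySem.Dict.getD_of_mem_items _ hitems hknd d0
  have hcont : (PySem.Dict.mk (us.map (fun b => (b, g b)))).contains k = true := by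
    rw [PySem.Dict.contains_iff_mem_keys, hkeys]; exact hk
  unfold PySem.Dict.modify
  rw [hget]
  unfold PySem.Dict.insert
  rw [hcont]
  simp only [if_true, List.map_map]
  congr 1
  apply List.map_congr_left
  intro b _
  by_cases hb : b = k
  · subst hb; simp
  · simp [Function.comp, hb, beq_eq_false_iff_ne.mpr hb]

-- a fold of pointwise increments over nodup keys contained in us
theorem pv_foldl_modify_inner (labels : List String) (us : List String) (hnd : us.Nodup)
    (hsub : ∀ b ∈ labels, b ∈ us) (hlnd : labels.Nodup) (g : String → Int) :
    labels.foldl (fun inn b => inn.modify b 0 (· + 1))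
        (PySem.Dict.mk (us.map (fun b => (b, g b))))
      = PySem.Dict.mk (us.map (fun b => (b, g b + if b ∈ labels then 1 else 0))) := by
  induction labels generalizing g with
  | nil => simp
  | cons l ls ih =>
    have hl : l ∈ us := hsub l (by simp)
    have hsub' : ∀ b ∈ ls, b ∈ us := fun b hb => hsub b (by simp [hb])
    have hlnotin : l ∉ ls := (List.nodup_cons.mp hlnd).1
    have hlsnd : ls.Nodup := (List.nodup_cons.mp hlnd).2
    rw [List.foldl_cons, pv_modify_mk_map us hnd g l hl 0 (· + 1),
        ih hsub' hlsnd (fun b => if b = l then g b + 1 else g b)]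
    congr 1
    apply List.map_congr_left
    intro b _
    by_cases hb : b = l
    · subst hb
      simp [hlnotin]
    · simp [hb]

theorem pv_foldl_modify_outer (ks : List String) (us : List String) (hnd : us.Nodup)
    (hsub : ∀ a ∈ ks, a ∈ us) (hknd : ks.Nodup)
    (F : PySem.Dict String Int → PySem.Dict String Int) (G : String → PySem.Dict String Int) :
    ks.foldl (fun m a => m.modify a PySem.Dict.empty F)
        (PySem.Dict.mk (us.map (fun a => (a, G a))))
      = PySem.Dict.mk (us.map (fun a => (a, if a ∈ ks then F (G a) else G a))) := by
  induction ks generalizing G with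
  | nil => simp
  | cons l ls ih =>
    have hl : l ∈ us := hsub l (by simp)
    have hsub' : ∀ a ∈ ls, a ∈ us := fun a ha => hsub a (by simp [ha])
    have hlnotin : l ∉ ls := (List.nodup_cons.mp hknd).1
    have hlsnd : ls.Nodup := (List.nodup_cons.mp hknd).2
    rw [List.foldl_cons, pv_modify_mk_map us hnd G l hl PySem.Dict.empty F,
        ih hsub' hlsnd (fun a => if a = l then F (G a) else G a)]
    congr 1
    apply List.map_congr_left
    intro a _
    by_cases ha : a = l
    · subst ha
      simp [hlnotin]
    · simp [ha]

-- one row step of B on the canonical form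
theorem pv_row_step (row : List String) (us : List String) (hnd : us.Nodup)
    (hsub : ∀ x ∈ row, x ∈ us) (g : String → String → Int) :
    (PySem.List.dedup row).foldl (fun m a =>
        m.modify a PySem.Dict.empty (fun inner =>
          (PySem.List.dedup row).foldl (fun inn b => inn.modify b 0 (· + 1)) inner))
      (pvMkM us g)
      = pvMkM us (fun a b => if row.contains a && row.contains b then g a b + 1 else g a b) := by
  have hmem : ∀ x : String, row.contains x = true ↔ x ∈ PySem.List.dedup row := by
    intro x; rw [List.contains_iff_mem, PySem.List.mem_dedup]
  have hdsub : ∀ x ∈ PySem.List.dedup row, x ∈ us := by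
    intro x hx; exact hsub x ((PySem.List.mem_dedup row x).mp hx)
  have hdnd : (PySem.List.dedup row).Nodup := PySem.List.nodup_dedup row
  unfold pvMkM
  rw [pv_foldl_modify_outer (PySem.List.dedup row) us hnd hdsub hdnd]
  congr 1
  apply List.map_congr_left
  intro a _
  by_cases ha : a ∈ PySem.List.dedup row
  · have ha' : row.contains a = true := (hmem a).mpr ha
    rw [if_pos ha,
        pv_foldl_modify_inner (PySem.List.dedup row) us hnd hdsub hdnd (fun b => g a b)]
    apply congrArg (Prod.mk a)
    apply PySem.Dict.ext
    apply List.map_congr_left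
    intro b _
    by_cases hb : b ∈ PySem.List.dedup row
    · have harow : a ∈ row := (PySem.List.mem_dedup row a).mp ha
      have hbrow : b ∈ row := (PySem.List.mem_dedup row b).mp hb
      simp [harow, hbrow]
    · have hbrow : b ∉ row := fun h => hb ((PySem.List.mem_dedup row b).mpr h)
      simp [hbrow]
  · have ha' : row.contains a = false :=
      Bool.eq_false_iff.mpr (fun h => ha ((hmem a).mp h))
    rw [if_neg ha]
    apply congrArg (Prod.mk a)
    apply PySem.Dict.ext
    apply List.map_congr_left
    intro b _
    have harow : a ∉ row := fun h => ha ((PySem.List.mem_dedup row a).mpr h)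
    simp [harow]

-- B's whole fold over the rows
theorem pv_rows_fold (vs : List (List String)) (us : List String) (hnd : us.Nodup)
    (hsub : ∀ row ∈ vs, ∀ x ∈ row, x ∈ us) (g : String → String → Int) :
    vs.foldl (fun matrix row =>
        (PySem.List.dedup row).foldl (fun m a =>
            m.modify a PySem.Dict.empty (fun inner =>
              (PySem.List.dedup row).foldl (fun inn b => inn.modify b 0 (· + 1)) inner)) matrix)
      (pvMkM us g)
      = pvMkM us (fun a b =>
          vs.foldl (fun acc row => if row.contains a && row.contains b then acc + 1 else acc) (g a b)) := by
  induction vs generalizing g with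
  | nil => rfl
  | cons r rs ih =>
    rw [List.foldl_cons, pv_row_step r us hnd (hsub r (by simp)),
        ih (fun row hrow => hsub row (by simp [hrow]))]
    rfl

-- A's port in canonical form
theorem pvA (vs : List (List String)) :
    cooccurrence_matrix_py vs
      = (pvUnique vs).map (fun a => (a, (pvUnique vs).map (fun b =>
          (b, vs.foldl (fun acc row => if row.contains a && row.contains b then acc + 1 else acc) (0 : Int))))) := by
  unfold cooccurrence_matrix_py
  have houter := PySem.Dict.items_foldl_insert_fresh (pvUnique vs) (fun a => a)
        (fun a => (pvUnique vs).foldl (fun inner b =>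
            inner.insert b
              (vs.foldl (fun acc row => if row.contains a && row.contains b then acc + 1 else acc) (0 : Int)))
          PySem.Dict.empty)
        PySem.Dict.empty (fun a _ => PySem.Dict.contains_empty a) (by simpa using pvUnique_nodup vs)
  simp only [houter]
  simp only [show (PySem.Dict.empty : PySem.Dict String (PySem.Dict String Int)).items = [] from rfl,
    List.nil_append, List.map_map]
  apply List.map_congr_left
  intro a _
  apply congrArg (Prod.mk a)
  have hinner := PySem.Dict.items_foldl_insert_fresh (pvUnique vs) (fun b => b)
        (fun b => vs.foldl (fun acc row => if row.contains a && row.contains b then acc + 1 else acc) (0 : Int))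
        PySem.Dict.empty (fun b _ => PySem.Dict.contains_empty b) (by simpa using pvUnique_nodup vs)
  simp only [hinner]
  simp only [show (PySem.Dict.empty : PySem.Dict String Int).items = [] from rfl, List.nil_append]

-- B's port in canonical form
theorem pvB (vs : List (List String)) :
    cooccurrence_matrix_py_alt vs
      = (pvUnique vs).map (fun a => (a, (pvUnique vs).map (fun b =>
          (b, vs.foldl (fun acc row => if row.contains a && row.contains b then acc + 1 else acc) (0 : Int))))) := by
  unfold cooccurrence_matrix_py_alt
  rw [show (PySem.Dict.mk ((pvUnique vs).map (fun a =>
        (a, PySem.Dict.mk ((pvUnique vs).map (fun b => (b, (0 : Int))))))))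
      = pvMkM (pvUnique vs) (fun _ _ => 0) from rfl]
  rw [pv_rows_fold vs (pvUnique vs) (pvUnique_nodup vs) (pvUnique_sub vs) (fun _ _ => 0)]
  simp [pvMkM, List.map_map]

-- ===== VERDICT (by name: the statement is the Claim_ definition above) =====
theorem cooccurrence_matrix_py_spec : Claim_equal_cooccurrence_matrix_py := by
  intro vs _
  unfold Spec_cooccurrence_matrix_py
  rw [pvA vs, pvB vs]
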